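-- pv_equiv track=rewrite | github.com/EliFrun/my-leetcode-submissions | submissions/0672-bulb-switcher-ii/solution.py | flipLights
-- ===== SOURCE A (Python) =====
-- def flipLights(n: int, presses: int) -> int:
--     curr = 0
--     a = 0
--     b = 0
--     c = 0
--     d = 0
--     for i in range(n):
--         curr |= 1 << i
--         a |= 1 << i
--         if i % 2 == 0:
--             b |= 1 << i
--         if i % 2 == 1:
--             c |= 1 << i
--         if i % 3 == 0:
--             d |= 1 << i
--
--
--     curr = set([curr])
--     for _ in range(presses):
--         nxt = set()
--         for s in curr:
--             nxt.add(s ^ a)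
--             nxt.add(s ^ b)
--             nxt.add(s ^ c)
--             nxt.add(s ^ d)
--
--         curr = nxt
--     return len(curr)
-- ===== SOURCE B (Python) =====
-- def flipLights(n: int, presses: int) -> int:
--     # O(1): the state space stabilizes; the answer depends only on min(n,3) and min(presses,3).
--     m = 3 if n > 3 else (0 if n < 0 else n)
--     p = 3 if presses > 3 else (0 if presses < 0 else presses)
--     return [[1, 1, 1, 1], [1, 2, 2, 2], [1, 3, 4, 4], [1, 4, 7, 8]][m][p]
-- ===== Notes on version B (the rewrite author's own statement) =====
-- stated objective: faster
-- what changed: Replaces the O(n)-mask build plus O(presses) set-BFS simulation with an O(1) table lookup, using the fact that the reachable-state count depends only on min(n,3) and min(presses,3).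
import Mathlib
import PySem

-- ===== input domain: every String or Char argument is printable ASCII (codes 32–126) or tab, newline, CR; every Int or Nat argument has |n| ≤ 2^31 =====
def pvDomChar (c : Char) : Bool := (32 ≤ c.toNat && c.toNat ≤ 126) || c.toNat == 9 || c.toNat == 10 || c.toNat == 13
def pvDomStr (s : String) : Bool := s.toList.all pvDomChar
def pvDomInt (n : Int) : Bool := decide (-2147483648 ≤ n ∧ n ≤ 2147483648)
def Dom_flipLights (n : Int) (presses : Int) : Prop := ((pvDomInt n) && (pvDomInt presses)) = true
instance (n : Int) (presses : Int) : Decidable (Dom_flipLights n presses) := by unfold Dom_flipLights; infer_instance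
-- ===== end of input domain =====

-- B replaces A's O(n) mask build + O(presses) set simulation by an O(1) table lookup on (min(n,3), min(presses,3)).

-- ===== PORT A =====
-- the body of A's first for-loop: update (curr, a, b, c, d) at index i
def pvMaskStep (s : Int × Int × Int × Int × Int) (i : Int) : Int × Int × Int × Int × Int :=
  (PySem.Int.bor s.1 ((1 : Int) <<< i.toNat),
   PySem.Int.bor s.2.1 ((1 : Int) <<< i.toNat),
   if PySem.Int.mod i 2 = 0 then PySem.Int.bor s.2.2.1 ((1 : Int) <<< i.toNat) else s.2.2.1,
   if PySem.Int.mod i 2 = 1 then PySem.Int.bor s.2.2.2.1 ((1 : Int) <<< i.toNat) else s.2.2.2.1,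
   if PySem.Int.mod i 3 = 0 then PySem.Int.bor s.2.2.2.2 ((1 : Int) <<< i.toNat) else s.2.2.2.2)

-- the body of A's press loop: nxt = set(); for s in curr: nxt.add(s^a); … ; curr = nxt
def pvPressStep (a b c d : Int) (cur : PySem.Set Int) : PySem.Set Int :=
  cur.foldl
    (fun nxt s =>
      ((((nxt.add (PySem.Int.bxor s a)).add (PySem.Int.bxor s b)).add
          (PySem.Int.bxor s c)).add (PySem.Int.bxor s d)))
    PySem.Set.empty

def flipLights (n : Int) (presses : Int) : Int :=
  let st := (PySem.List.pyRange 0 n).foldl pvMaskStep (0, 0, 0, 0, 0)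
  let curr : PySem.Set Int := PySem.Set.ofList [st.1]
  let final := (PySem.List.pyRange 0 presses).foldl
    (fun cur _ => pvPressStep st.2.1 st.2.2.1 st.2.2.2.1 st.2.2.2.2 cur) curr
  PySem.Set.len final

-- ===== PORT B =====
def flipLights_alt (n : Int) (presses : Int) : Int :=
  let m : Int := if 3 < n then 3 else if n < 0 then 0 else n
  let p : Int := if 3 < presses then 3 else if presses < 0 then 0 else presses
  PySem.List.pyGetD
    (PySem.List.pyGetD
      ([[1, 1, 1, 1], [1, 2, 2, 2], [1, 3, 4, 4], [1, 4, 7, 8]] : List (List Int)) m [])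
    p 0

-- ===== PRECONDITION & SPEC =====
def Spec_flipLights (n : Int) (presses : Int) (out : Int) : Prop := out = flipLights_alt n presses
instance (n : Int) (presses : Int) (out : Int) : Decidable (Spec_flipLights n presses out) := by unfold Spec_flipLights; infer_instance

-- ===== CLAIM (what is proved, stated in full; the proofs are below) =====
def Claim_equal_flipLights : Prop := ∀ (n : Int) (presses : Int), Dom_flipLights n presses → Spec_flipLights n presses (flipLights n presses)

-- ===== LEMMAS AND PROOFS =====

-- Nat models of the four masks built by A's first loop
def pvA : Nat → Nat
  | 0 => 0
  | m + 1 => pvA m ||| (1 <<< m)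
def pvB : Nat → Nat
  | 0 => 0
  | m + 1 => if m % 2 = 0 then pvB m ||| (1 <<< m) else pvB m
def pvC : Nat → Nat
  | 0 => 0
  | m + 1 => if m % 2 = 1 then pvC m ||| (1 <<< m) else pvC m
def pvD : Nat → Nat
  | 0 => 0
  | m + 1 => if m % 3 = 0 then pvD m ||| (1 <<< m) else pvD m

theorem pv_shift_cast (k : Nat) : (1 : Int) <<< k = ((1 <<< k : Nat) : Int) := by
  simp [Int.shiftLeft_eq, Nat.shiftLeft_eq]

theorem pv_maskFold (m : Nat) :
    (PySem.List.pyRange 0 (m : Int)).foldl pvMaskStep (0, 0, 0, 0, 0) =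
      (((pvA m : Nat) : Int), ((pvA m : Nat) : Int), ((pvB m : Nat) : Int),
        ((pvC m : Nat) : Int), ((pvD m : Nat) : Int)) := by
  induction m with
  | zero => rfl
  | succ m ih =>
    have h : ((m + 1 : Nat) : Int) = (m : Int) + 1 := by push_cast; ring
    rw [h, PySem.List.pyRange_one_succ_right (by positivity), List.foldl_append, ih]
    simp only [List.foldl, pvMaskStep, pvA, pvB, pvC, pvD]
    have ht : ((m : Int)).toNat = m := by simp
    have h2 : PySem.Int.mod (m : Int) 2 = ((m % 2 : Nat) : Int) := PySem.Int.mod_natCast m 2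
    have h3 : PySem.Int.mod (m : Int) 3 = ((m % 3 : Nat) : Int) := PySem.Int.mod_natCast m 3
    simp only [ht, h2, h3, pv_shift_cast, PySem.Int.bor_natCast]
    simp only [Nat.cast_eq_zero, Nat.cast_eq_one, Nat.cast_ite]

theorem pv_testBit_shift (k i : Nat) : ((1 <<< k : Nat)).testBit i = decide (i = k) := by
  rw [Nat.one_shiftLeft, Nat.testBit_two_pow]; simp [eq_comm]

theorem pv_tA (m j : Nat) : (pvA m).testBit j = decide (j < m) := by
  induction m with
  | zero => simp [pvA]
  | succ m ih =>
    simp only [pvA, Nat.testBit_or, ih, pv_testBit_shift]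
    by_cases h : j < m <;> by_cases h2 : j = m <;> simp [h, h2] <;> omega

theorem pv_tB (m j : Nat) : (pvB m).testBit j = decide (j < m ∧ j % 2 = 0) := by
  induction m with
  | zero => simp [pvB]
  | succ m ih =>
    simp only [pvB]
    by_cases hm : m % 2 = 0 <;>
      simp only [hm, if_true, if_false, Nat.testBit_or, ih, pv_testBit_shift] <;>
      by_cases h : j < m <;> by_cases h2 : j = m <;> simp [h, h2] <;> omega

theorem pv_tC (m j : Nat) : (pvC m).testBit j = decide (j < m ∧ j % 2 = 1) := by
  induction m with
  | zero => simp [pvC]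
  | succ m ih =>
    simp only [pvC]
    by_cases hm : m % 2 = 1 <;>
      simp only [hm, if_true, if_false, Nat.testBit_or, ih, pv_testBit_shift] <;>
      by_cases h : j < m <;> by_cases h2 : j = m <;> simp [h, h2] <;> omega

theorem pv_tD (m j : Nat) : (pvD m).testBit j = decide (j < m ∧ j % 3 = 0) := by
  induction m with
  | zero => simp [pvD]
  | succ m ih =>
    simp only [pvD]
    by_cases hm : m % 3 = 0 <;>
      simp only [hm, if_true, if_false, Nat.testBit_or, ih, pv_testBit_shift] <;>
      by_cases h : j < m <;> by_cases h2 : j = m <;> simp [h, h2] <;> omega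

theorem pv_C_eq (m : Nat) : pvC m = pvA m ^^^ pvB m := by
  apply Nat.eq_of_testBit_eq
  intro i
  simp only [Nat.testBit_xor, pv_tA, pv_tB, pv_tC]
  by_cases h : i < m <;> by_cases h2 : i % 2 = 0 <;> simp [h, h2] <;> omega

theorem pv_seven (i : Nat) : (7 : Nat).testBit i = decide (i < 3) := by
  have := Nat.testBit_two_pow_sub_one 3 i; norm_num at this; omega

theorem pv_low_A (m : Nat) (h : 3 ≤ m) : pvA m &&& 7 = 7 := by
  apply Nat.eq_of_testBit_eq
  intro i
  simp only [Nat.testBit_and, pv_tA, pv_seven]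
  by_cases hi : i < 3 <;> simp [hi] <;> omega

theorem pv_low_B (m : Nat) (h : 3 ≤ m) : pvB m &&& 7 = 5 := by
  apply Nat.eq_of_testBit_eq
  intro i
  simp only [Nat.testBit_and, pv_tB, pv_seven]
  have h8 : ∀ i : Nat, (5 : Nat) < 2 ^ (i + 3) := by
    intro i
    calc (5 : Nat) < 2 ^ 3 := by norm_num
    _ ≤ 2 ^ (i + 3) := Nat.pow_le_pow_right (by norm_num) (by omega)
  rcases i with _ | _ | _ | i <;>
    first
    | (simp [Nat.testBit_eq_false_of_lt (h8 i)])
    | (simp [show 0 < m by omega, show 1 < m by omega, show 2 < m by omega]; try decide)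

theorem pv_low_D (m : Nat) (h : 3 ≤ m) : pvD m &&& 7 = 1 := by
  apply Nat.eq_of_testBit_eq
  intro i
  simp only [Nat.testBit_and, pv_tD, pv_seven]
  have h8 : ∀ i : Nat, (1 : Nat) < 2 ^ (i + 3) := by
    intro i
    calc (1 : Nat) < 2 ^ 3 := by norm_num
    _ ≤ 2 ^ (i + 3) := Nat.pow_le_pow_right (by norm_num) (by omega)
  rcases i with _ | _ | _ | i <;>
    first
    | (simp [Nat.testBit_eq_false_of_lt (h8 i)])
    | (simp [show 0 < m by omega, show 1 < m by omega, show 2 < m by omega]; try decide)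

-- ---- generic set-simulation layer ----

theorem pv_foldl_const {σ : Type} (l : List Int) (f : σ → σ) (i : σ) :
    l.foldl (fun acc _ => f acc) i = f^[l.length] i := by
  induction l generalizing i with
  | nil => rfl
  | cons x t ih => simp [List.foldl, ih, Function.iterate_succ_apply]

theorem pv_len_pyRange (p : Nat) : (PySem.List.pyRange 0 (p : Int)).length = p := by
  rw [PySem.List.pyRange_zero_natCast]; simp

theorem pv_add_toFinset (s : PySem.Set Int) (x : Int) :
    (s.add x).toFinset = insert x s.toFinset := by
  simp only [PySem.Set.add, PySem.Set.contains]
  by_cases h : x ∈ s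
  · simp [h]
  · simp [h]

theorem pv_add_nodup (s : PySem.Set Int) (x : Int) (h : s.Nodup) : (s.add x).Nodup := by
  simp only [PySem.Set.add, PySem.Set.contains]
  by_cases hx : x ∈ s
  · simp [hx, h]
  · simp [List.nodup_append, h, hx]
    exact fun a ha he => hx (he ▸ ha)

def pvG (a b c d : Int) (x : Int) : Finset Int :=
  {PySem.Int.bxor x a, PySem.Int.bxor x b, PySem.Int.bxor x c, PySem.Int.bxor x d}

def pvSF (a b c d : Int) (F : Finset Int) : Finset Int := F.biUnion (pvG a b c d)

theorem pv_inner_toFinset (a b c d : Int) (l : List Int) (acc : PySem.Set Int) :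
    (l.foldl
      (fun (nxt : PySem.Set Int) s =>
        ((((nxt.add (PySem.Int.bxor s a)).add (PySem.Int.bxor s b)).add
            (PySem.Int.bxor s c)).add (PySem.Int.bxor s d))) acc).toFinset =
      acc.toFinset ∪ l.toFinset.biUnion (pvG a b c d) := by
  induction l generalizing acc with
  | nil => simp
  | cons x t ih =>
    simp only [List.foldl, ih, pv_add_toFinset, List.toFinset_cons, Finset.biUnion_insert, pvG]
    ext y
    simp
    tauto

theorem pv_press_toFinset (a b c d : Int) (cur : PySem.Set Int) :
    (pvPressStep a b c d cur).toFinset = pvSF a b c d cur.toFinset := by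
  simpa [pvSF] using pv_inner_toFinset a b c d cur []

theorem pv_inner_nodup (a b c d : Int) (l : List Int) (acc : PySem.Set Int) (h : acc.Nodup) :
    (l.foldl
      (fun (nxt : PySem.Set Int) s =>
        ((((nxt.add (PySem.Int.bxor s a)).add (PySem.Int.bxor s b)).add
            (PySem.Int.bxor s c)).add (PySem.Int.bxor s d))) acc).Nodup := by
  induction l generalizing acc with
  | nil => exact h
  | cons x t ih =>
    exact ih _ (pv_add_nodup _ _ (pv_add_nodup _ _ (pv_add_nodup _ _ (pv_add_nodup _ _ h))))

theorem pv_press_nodup (a b c d : Int) (cur : PySem.Set Int) :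
    (pvPressStep a b c d cur).Nodup := by
  exact pv_inner_nodup a b c d cur [] (by simp)

theorem pv_iter_toFinset (a b c d : Int) (s : PySem.Set Int) (k : Nat) :
    ((pvPressStep a b c d)^[k] s).toFinset = (pvSF a b c d)^[k] s.toFinset := by
  induction k generalizing s with
  | zero => rfl
  | succ k ih =>
    rw [Function.iterate_succ_apply, Function.iterate_succ_apply, ih, pv_press_toFinset]

theorem pv_iter_nodup (a b c d : Int) (s : PySem.Set Int) (h : s.Nodup) (k : Nat) :
    ((pvPressStep a b c d)^[k] s).Nodup := by
  induction k generalizing s with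
  | zero => exact h
  | succ k ih =>
    rw [Function.iterate_succ_apply]
    exact ih _ (pv_press_nodup a b c d s)

-- the value A returns is the cardinality of the contents after presses.toNat steps
theorem pv_len_eq_card (n presses : Int) (curr a b c d : Int)
    (hst : (PySem.List.pyRange 0 n).foldl pvMaskStep (0, 0, 0, 0, 0) = (curr, a, b, c, d)) :
    flipLights n presses = (((pvSF a b c d)^[presses.toNat] {curr}).card : Int) := by
  unfold flipLights
  rw [hst]
  have hl : (PySem.List.pyRange 0 presses).foldl
      (fun cur _ => pvPressStep a b c d cur) (PySem.Set.ofList [curr]) =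
      (pvPressStep a b c d)^[presses.toNat] (PySem.Set.ofList [curr]) := by
    rcases le_or_gt presses 0 with hp | hp
    · rw [PySem.List.pyRange_one_eq_nil hp]
      have : presses.toNat = 0 := by omega
      rw [this]
      rfl
    · have hk : presses = ((presses.toNat : Nat) : Int) := by omega
      rw [hk, pv_foldl_const, pv_len_pyRange]
      have : ((presses.toNat : Nat) : Int).toNat = presses.toNat := by omega
      rw [this]
  simp only [hl]
  have hofl : (PySem.Set.ofList [curr]) = ([curr] : List Int) := rfl
  have hnd : ((pvPressStep a b c d)^[presses.toNat] (PySem.Set.ofList [curr])).Nodup :=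
    pv_iter_nodup a b c d _ (by rw [hofl]; simp) _
  have hcard := List.toFinset_card_of_nodup hnd
  rw [pv_iter_toFinset] at hcard
  have hfin : (PySem.Set.ofList [curr]).toFinset = ({curr} : Finset Int) := by
    rw [hofl]; simp
  rw [hfin] at hcard
  show ((PySem.Set.len ((pvPressStep a b c d)^[presses.toNat] (PySem.Set.ofList [curr]))) : Int) = _
  show (((pvPressStep a b c d)^[presses.toNat] (PySem.Set.ofList [curr])).length : Int) = _
  rw [← hcard]

-- ---- residue layer for n ≥ 3 ----

theorem pv_iter_fix {α : Type} [DecidableEq α] (f : Finset α → Finset α) (F : Finset α)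
    (hfix : f F = F) (k : Nat) : f^[k] F = F := by
  induction k with
  | zero => rfl
  | succ k ih => rw [Function.iterate_succ_apply', ih, hfix]

def pvUnl (a b d : Nat) : Nat → Nat
  | 7 => a
  | 5 => b
  | 2 => a ^^^ b
  | 1 => d
  | 6 => a ^^^ d
  | 4 => b ^^^ d
  | 3 => a ^^^ b ^^^ d
  | _ => 0

def pvEmb (a b d : Nat) (ρ : Nat) : Int := ((a ^^^ pvUnl a b d ρ : Nat) : Int)

def pvSR (F : Finset Nat) : Finset Nat :=
  F.biUnion (fun r => {r ^^^ 7, r ^^^ 5, r ^^^ 2, r ^^^ 1})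

def pvR8 : Finset Nat := {0, 1, 2, 3, 4, 5, 6, 7}

theorem pv_SR_R8 : pvSR pvR8 = pvR8 := by decide

theorem pv_mem_R8 (x : Nat) : x ∈ pvR8 ↔ x < 8 := by
  simp [pvR8]; omega

theorem pv_SR_sub (F : Finset Nat) (h : F ⊆ pvR8) : pvSR F ⊆ pvR8 := by
  intro x hx
  simp only [pvSR, Finset.mem_biUnion] at hx
  obtain ⟨r, hr, hx⟩ := hx
  have hr8 : r < 8 := (pv_mem_R8 r).1 (h hr)
  rw [pv_mem_R8]
  have hxor : ∀ s : Nat, s < 8 → r ^^^ s < 8 := by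
    intro s hs
    exact Nat.xor_lt_two_pow (n := 3) hr8 hs
  simp only [Finset.mem_insert, Finset.mem_singleton] at hx
  rcases hx with rfl | rfl | rfl | rfl <;> [exact hxor 7 (by norm_num); exact hxor 5 (by norm_num); exact hxor 2 (by norm_num); exact hxor 1 (by norm_num)]

theorem pv_iter_SR_sub (k : Nat) : pvSR^[k] {0} ⊆ pvR8 := by
  induction k with
  | zero => intro x hx; simp at hx; simp [hx, pvR8]
  | succ k ih => rw [Function.iterate_succ_apply']; exact pv_SR_sub _ ih

theorem pv_iter_SR_big (k : Nat) (h : 3 ≤ k) : pvSR^[k] {0} = pvR8 := by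
  obtain ⟨j, rfl⟩ : ∃ j, k = 3 + j := ⟨k - 3, by omega⟩
  rw [add_comm, Function.iterate_add_apply]
  have h3 : pvSR^[3] ({0} : Finset Nat) = pvR8 := by decide
  rw [h3]
  exact pv_iter_fix pvSR pvR8 pv_SR_R8 j

theorem pv_unl_step (a b d : Nat) (ρ : Nat) (hρ : ρ < 8) :
    pvUnl a b d (ρ ^^^ 7) = a ^^^ pvUnl a b d ρ ∧
    pvUnl a b d (ρ ^^^ 5) = b ^^^ pvUnl a b d ρ ∧
    pvUnl a b d (ρ ^^^ 2) = (a ^^^ b) ^^^ pvUnl a b d ρ ∧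
    pvUnl a b d (ρ ^^^ 1) = d ^^^ pvUnl a b d ρ := by
  interval_cases ρ <;>
    refine ⟨?_, ?_, ?_, ?_⟩ <;>
    · norm_num [pvUnl]
      try simp [Nat.xor_comm, Nat.xor_left_comm]


theorem pv_unl_low (a b d : Nat) (ha : a &&& 7 = 7) (hb : b &&& 7 = 5) (hd : d &&& 7 = 1)
    (ρ : Nat) (hρ : ρ < 8) : pvUnl a b d ρ &&& 7 = ρ := by
  interval_cases ρ <;> simp [pvUnl, Nat.and_xor_distrib_right, ha, hb, hd]

theorem pv_emb_inj (a b d : Nat) (ha : a &&& 7 = 7) (hb : b &&& 7 = 5) (hd : d &&& 7 = 1)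
    (ρ ρ' : Nat) (hρ : ρ < 8) (hρ' : ρ' < 8) (h : pvEmb a b d ρ = pvEmb a b d ρ') : ρ = ρ' := by
  simp only [pvEmb] at h
  have hn : (a ^^^ pvUnl a b d ρ : Nat) = a ^^^ pvUnl a b d ρ' := by exact_mod_cast h
  have h7 : (a ^^^ pvUnl a b d ρ) &&& 7 = (a ^^^ pvUnl a b d ρ') &&& 7 := by rw [hn]
  rw [Nat.and_xor_distrib_right, Nat.and_xor_distrib_right, ha,
    pv_unl_low a b d ha hb hd ρ hρ, pv_unl_low a b d ha hb hd ρ' hρ'] at h7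
  have := congrArg (fun x => 7 ^^^ x) h7
  simpa [Nat.xor_xor_cancel_left] using this

theorem pv_G_emb (a b d : Nat) (ρ : Nat) (hρ : ρ < 8) :
    pvG ((a : Nat) : Int) ((b : Nat) : Int) (((a ^^^ b : Nat)) : Int) ((d : Nat) : Int) (pvEmb a b d ρ) =
      ({ρ ^^^ 7, ρ ^^^ 5, ρ ^^^ 2, ρ ^^^ 1} : Finset Nat).image (pvEmb a b d) := by
  obtain ⟨h7, h5, h2, h1⟩ := pv_unl_step a b d ρ hρ
  have key : ∀ x : Nat, (a ^^^ pvUnl a b d ρ) ^^^ x = a ^^^ (x ^^^ pvUnl a b d ρ) := by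
    intro x
    simp [Nat.xor_comm, Nat.xor_left_comm]
  simp only [pvG, pvEmb, PySem.Int.bxor_natCast, Finset.image_insert, Finset.image_singleton]
  rw [h7, h5, h2, h1, key a, key b, key (a ^^^ b), key d]

theorem pv_SF_image (a b d : Nat) (F : Finset Nat) (hF : F ⊆ pvR8) :
    pvSF ((a : Nat) : Int) ((b : Nat) : Int) (((a ^^^ b : Nat)) : Int) ((d : Nat) : Int)
        (F.image (pvEmb a b d)) =
      (pvSR F).image (pvEmb a b d) := by
  rw [pvSF, Finset.image_biUnion, pvSR, Finset.biUnion_image]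
  apply Finset.biUnion_congr rfl
  intro ρ hρ
  exact pv_G_emb a b d ρ ((pv_mem_R8 ρ).1 (hF hρ))

theorem pv_iter_SF_image (a b d : Nat) (k : Nat) :
    (pvSF ((a : Nat) : Int) ((b : Nat) : Int) (((a ^^^ b : Nat)) : Int) ((d : Nat) : Int))^[k]
        ({((a : Nat) : Int)} : Finset Int) =
      (pvSR^[k] {0}).image (pvEmb a b d) := by
  induction k with
  | zero => simp [pvEmb, pvUnl]
  | succ k ih =>
    rw [Function.iterate_succ_apply', Function.iterate_succ_apply', ih,
      pv_SF_image a b d _ (pv_iter_SR_sub k)]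

theorem pv_card_iter (a b d : Nat) (ha : a &&& 7 = 7) (hb : b &&& 7 = 5) (hd : d &&& 7 = 1)
    (k : Nat) :
    ((pvSF ((a : Nat) : Int) ((b : Nat) : Int) (((a ^^^ b : Nat)) : Int) ((d : Nat) : Int))^[k]
        ({((a : Nat) : Int)} : Finset Int)).card = (pvSR^[k] ({0} : Finset Nat)).card := by
  rw [pv_iter_SF_image]
  apply Finset.card_image_of_injOn
  intro ρ hρ ρ' hρ' h
  exact pv_emb_inj a b d ha hb hd ρ ρ'
    ((pv_mem_R8 ρ).1 (pv_iter_SR_sub k hρ)) ((pv_mem_R8 ρ').1 (pv_iter_SR_sub k hρ')) h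

-- ---- small-n fixed points ----

-- evaluation of B's table lookup once both clamped indices are known
theorem pv_alt_eval (n presses mi pi : Int)
    (hm : (if 3 < n then (3 : Int) else if n < 0 then 0 else n) = mi)
    (hp : (if 3 < presses then (3 : Int) else if presses < 0 then 0 else presses) = pi) :
    flipLights_alt n presses =
      PySem.List.pyGetD
        (PySem.List.pyGetD
          ([[1, 1, 1, 1], [1, 2, 2, 2], [1, 3, 4, 4], [1, 4, 7, 8]] : List (List Int)) mi [])
        pi 0 := by
  simp only [flipLights_alt, hm, hp]

-- ===== VERDICT (by name: the statement is the Claim_ definition above) =====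
theorem flipLights_spec : Claim_equal_flipLights := by
  unfold Claim_equal_flipLights Spec_flipLights
  intro n presses _
  rcases (by omega : n ≤ 0 ∨ n = 1 ∨ n = 2 ∨ 3 ≤ n) with hn | rfl | rfl | hn
  · -- n ≤ 0 : all masks are 0, the set stays {0}
    have hst : (PySem.List.pyRange 0 n).foldl pvMaskStep (0, 0, 0, 0, 0) = (0, 0, 0, 0, 0) := by
      rw [PySem.List.pyRange_one_eq_nil hn]; rfl
    rw [pv_len_eq_card n presses 0 0 0 0 0 hst,
      pv_iter_fix (pvSF 0 0 0 0) {0} (by decide) presses.toNat]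
    rw [pv_alt_eval n presses 0 (if 3 < presses then 3 else if presses < 0 then 0 else presses)
      (by split_ifs <;> omega) rfl]
    split_ifs with h1 h2
    · decide
    · decide
    · interval_cases presses <;> decide
  · -- n = 1 : masks (a,b,c,d) = (1,1,0,1), start 1
    have hst : (PySem.List.pyRange 0 1).foldl pvMaskStep (0, 0, 0, 0, 0) = (1, 1, 1, 0, 1) := by
      decide
    rw [pv_len_eq_card 1 presses 1 1 1 0 1 hst]
    rcases (by omega : presses ≤ 0 ∨ presses = 1 ∨ presses = 2 ∨ 3 ≤ presses) with hp | rfl | rfl | hp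
    · rw [show presses.toNat = 0 by omega,
        pv_alt_eval 1 presses 1 0 (by norm_num) (by split_ifs <;> omega)]
      decide
    · rw [pv_alt_eval 1 1 1 1 (by norm_num) (by norm_num)]; decide
    · rw [pv_alt_eval 1 2 1 2 (by norm_num) (by norm_num)]; decide
    · rw [show presses.toNat = (presses.toNat - 1) + 1 by omega, Function.iterate_succ_apply,
        show pvSF 1 1 0 1 ({1} : Finset Int) = {0, 1} from by decide,
        pv_iter_fix (pvSF 1 1 0 1) {0, 1} (by decide),
        pv_alt_eval 1 presses 1 3 (by norm_num) (by split_ifs <;> omega)]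
      decide
  · -- n = 2 : masks (a,b,c,d) = (3,1,2,1), start 3
    have hst : (PySem.List.pyRange 0 2).foldl pvMaskStep (0, 0, 0, 0, 0) = (3, 3, 1, 2, 1) := by
      decide
    rw [pv_len_eq_card 2 presses 3 3 1 2 1 hst]
    rcases (by omega : presses ≤ 0 ∨ presses = 1 ∨ presses = 2 ∨ 3 ≤ presses) with hp | rfl | rfl | hp
    · rw [show presses.toNat = 0 by omega,
        pv_alt_eval 2 presses 2 0 (by norm_num) (by split_ifs <;> omega)]
      decide
    · rw [pv_alt_eval 2 1 2 1 (by norm_num) (by norm_num)]; decide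
    · rw [pv_alt_eval 2 2 2 2 (by norm_num) (by norm_num)]; decide
    · rw [show presses.toNat = (presses.toNat - 2) + 2 by omega, Function.iterate_add_apply,
        show (pvSF 3 1 2 1)^[2] ({3} : Finset Int) = {0, 1, 2, 3} from by decide,
        pv_iter_fix (pvSF 3 1 2 1) {0, 1, 2, 3} (by decide),
        pv_alt_eval 2 presses 2 3 (by norm_num) (by split_ifs <;> omega)]
      decide
  · -- 3 ≤ n : residue layer
    obtain ⟨m, rfl⟩ : ∃ m : Nat, n = (m : Int) := ⟨n.toNat, by omega⟩
    have hm3 : 3 ≤ m := by exact_mod_cast hn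
    have hst := pv_maskFold m
    rw [pv_C_eq m] at hst
    have ha := pv_low_A m hm3
    have hb := pv_low_B m hm3
    have hd := pv_low_D m hm3
    rw [pv_len_eq_card _ presses _ _ _ _ _ hst,
      pv_card_iter (pvA m) (pvB m) (pvD m) ha hb hd presses.toNat]
    have hmi : (if 3 < ((m : Nat) : Int) then (3 : Int) else if ((m : Nat) : Int) < 0 then 0 else ((m : Nat) : Int)) = 3 := by
      split_ifs <;> omega
    rcases (by omega : presses ≤ 0 ∨ presses = 1 ∨ presses = 2 ∨ 3 ≤ presses) with hp | rfl | rfl | hp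
    · rw [show presses.toNat = 0 by omega,
        pv_alt_eval _ presses 3 0 hmi (by split_ifs <;> omega)]
      decide
    · rw [pv_alt_eval _ 1 3 1 hmi (by norm_num)]; decide
    · rw [pv_alt_eval _ 2 3 2 hmi (by norm_num)]; decide
    · rw [pv_iter_SR_big presses.toNat (by omega),
        pv_alt_eval _ presses 3 3 hmi (by split_ifs <;> omega)]
      decide
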